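-- pv_equiv track=rewrite | github.com/jindahe/GND | MI_scaling/toric_code/src/core/cmi_calculation.py | define_geometry_geom1
-- ===== SOURCE A (Python) =====
-- def define_geometry_geom1(L, r):
--     """
--     Return (A, B, C) as frozensets of (i,j) plaquette indices.
--
--     A : center 2×2 plaquettes
--     B : ring of Chebyshev width r around A, clipped to [0,L)
--     C : ring of Chebyshev width r around B, clipped to [0,L)
--     """
--     # Top-left corner of the 2×2 A region
--     ci = L // 2 - 1
--     cj = L // 2 - 1
--
--     A = frozenset(
--         (ci + di, cj + dj)
--         for di in range(2) for dj in range(2)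
--         if 0 <= ci + di < L and 0 <= cj + dj < L
--     )
--
--     A_imin = min(i for i, _ in A)
--     A_imax = max(i for i, _ in A)
--     A_jmin = min(j for _, j in A)
--     A_jmax = max(j for _, j in A)
--
--     B_imin = max(0, A_imin - r)
--     B_imax = min(L - 1, A_imax + r)
--     B_jmin = max(0, A_jmin - r)
--     B_jmax = min(L - 1, A_jmax + r)
--
--     B = frozenset(
--         (i, j)
--         for i in range(B_imin, B_imax + 1)
--         for j in range(B_jmin, B_jmax + 1)
--         if (i, j) not in A
--     )
--
--     C_imin = max(0, B_imin - r)
--     C_imax = min(L - 1, B_imax + r)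
--     C_jmin = max(0, B_jmin - r)
--     C_jmax = min(L - 1, B_jmax + r)
--
--     C = frozenset(
--         (i, j)
--         for i in range(C_imin, C_imax + 1)
--         for j in range(C_jmin, C_jmax + 1)
--         if (i, j) not in A and (i, j) not in B
--     )
--
--     return A, B, C
-- ===== SOURCE B (Python) =====
-- def define_geometry_geom1(L, r):
--     """
--     Same (A, B, C) frozensets as the original, computed with closed-form
--     clipped bounds (the grid is square, so i- and j-bounds coincide) and a
--     single classifying sweep over the outer rectangle instead of three
--     region scans with set-membership exclusion.
--     """
--     c = L // 2 - 1
--     a_lo, a_hi = max(0, c), min(L - 1, c + 1)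
--     b_lo, b_hi = max(0, a_lo - r), min(L - 1, a_hi + r)
--     c_lo, c_hi = max(0, b_lo - r), min(L - 1, b_hi + r)
--
--     a_pts = []
--     for i in range(a_lo, a_hi + 1):
--         for j in range(a_lo, a_hi + 1):
--             a_pts.append((i, j))
--
--     b_pts, c_pts = [], []
--     for i in range(c_lo, c_hi + 1):
--         for j in range(c_lo, c_hi + 1):
--             if a_lo <= i <= a_hi and a_lo <= j <= a_hi:
--                 continue
--             if b_lo <= i <= b_hi and b_lo <= j <= b_hi:
--                 b_pts.append((i, j))
--             else:
--                 c_pts.append((i, j))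
--
--     return frozenset(a_pts), frozenset(b_pts), frozenset(c_pts)
-- ===== Notes on version B (the rewrite author's own statement) =====
-- stated objective: simpler
-- what changed: B replaces A's frozenset construction with min/max scans and two set-membership-filtered region comprehensions by closed-form clipped interval bounds (the grid is square, so one bound pair per region) and a single sweep over the outer rectangle that classifies each cell into B or C by interval tests.
import Mathlib
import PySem

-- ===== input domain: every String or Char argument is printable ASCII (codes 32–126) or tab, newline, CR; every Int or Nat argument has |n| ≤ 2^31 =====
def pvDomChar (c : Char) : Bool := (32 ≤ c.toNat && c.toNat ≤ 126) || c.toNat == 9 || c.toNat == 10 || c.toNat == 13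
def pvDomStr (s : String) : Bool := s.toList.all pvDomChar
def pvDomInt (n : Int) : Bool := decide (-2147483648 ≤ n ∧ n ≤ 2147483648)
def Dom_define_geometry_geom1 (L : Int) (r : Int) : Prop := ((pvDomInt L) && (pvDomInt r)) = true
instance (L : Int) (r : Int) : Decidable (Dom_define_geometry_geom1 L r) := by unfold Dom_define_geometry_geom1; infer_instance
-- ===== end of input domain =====

-- B replaces A's min/max scans and the two set-membership-filtered region scans by closed-form
-- clipped bounds and ONE classifying sweep over the outer rectangle (objective: simpler).

-- ===== PORT A =====
-- frozenset(generator) = Set.ofList of the generated list; the comprehension is flatMap/filter/map.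
def pvAsetA (L : Int) : PySem.Set (Int × Int) :=
  let ci := PySem.Int.floordiv L 2 - 1
  let cj := PySem.Int.floordiv L 2 - 1
  PySem.Set.ofList
    ((PySem.List.pyRange 0 2 1).flatMap (fun di =>
      ((PySem.List.pyRange 0 2 1).filter (fun dj =>
        decide (0 ≤ ci + di) && decide (ci + di < L) &&
        decide (0 ≤ cj + dj) && decide (cj + dj < L))).map (fun dj => (ci + di, cj + dj))))

-- min(...)/max(...) raise ValueError on an empty A (L ≤ 0): Pre_ excludes that, the .getD 0 is unreachable inside Pre_.
def pvAiminA (L : Int) : Int := (PySem.List.min? ((pvAsetA L).map (fun p => p.1)) (fun x => x)).getD 0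
def pvAimaxA (L : Int) : Int := (PySem.List.max? ((pvAsetA L).map (fun p => p.1)) (fun x => x)).getD 0
def pvAjminA (L : Int) : Int := (PySem.List.min? ((pvAsetA L).map (fun p => p.2)) (fun x => x)).getD 0
def pvAjmaxA (L : Int) : Int := (PySem.List.max? ((pvAsetA L).map (fun p => p.2)) (fun x => x)).getD 0

def pvBsetA (L : Int) (r : Int) : PySem.Set (Int × Int) :=
  let A := pvAsetA L
  let B_imin := max 0 (pvAiminA L - r)
  let B_imax := min (L - 1) (pvAimaxA L + r)
  let B_jmin := max 0 (pvAjminA L - r)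
  let B_jmax := min (L - 1) (pvAjmaxA L + r)
  PySem.Set.ofList
    ((PySem.List.pyRange B_imin (B_imax + 1) 1).flatMap (fun i =>
      ((PySem.List.pyRange B_jmin (B_jmax + 1) 1).filter (fun j =>
        !(PySem.Set.contains A (i, j)))).map (fun j => (i, j))))

def pvCsetA (L : Int) (r : Int) : PySem.Set (Int × Int) :=
  let A := pvAsetA L
  let B := pvBsetA L r
  let B_imin := max 0 (pvAiminA L - r)
  let B_imax := min (L - 1) (pvAimaxA L + r)
  let B_jmin := max 0 (pvAjminA L - r)
  let B_jmax := min (L - 1) (pvAjmaxA L + r)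
  let C_imin := max 0 (B_imin - r)
  let C_imax := min (L - 1) (B_imax + r)
  let C_jmin := max 0 (B_jmin - r)
  let C_jmax := min (L - 1) (B_jmax + r)
  PySem.Set.ofList
    ((PySem.List.pyRange C_imin (C_imax + 1) 1).flatMap (fun i =>
      ((PySem.List.pyRange C_jmin (C_jmax + 1) 1).filter (fun j =>
        !(PySem.Set.contains A (i, j)) && !(PySem.Set.contains B (i, j)))).map (fun j => (i, j))))

def define_geometry_geom1 (L : Int) (r : Int) :
    (List (Int × Int)) × (List (Int × Int)) × (List (Int × Int)) :=
  (pvAsetA L, pvBsetA L r, pvCsetA L r)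

-- ===== PORT B =====
-- 'lo <= i <= hi and lo <= j <= hi' (a square box test)
def pvBox (lo hi i j : Int) : Bool :=
  decide (lo ≤ i) && decide (i ≤ hi) && decide (lo ≤ j) && decide (j ≤ hi)

def pvAlo (L : Int) : Int := max 0 (PySem.Int.floordiv L 2 - 1)
def pvAhi (L : Int) : Int := min (L - 1) (PySem.Int.floordiv L 2 - 1 + 1)
def pvBlo (L : Int) (r : Int) : Int := max 0 (pvAlo L - r)
def pvBhi (L : Int) (r : Int) : Int := min (L - 1) (pvAhi L + r)
def pvClo (L : Int) (r : Int) : Int := max 0 (pvBlo L r - r)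
def pvChi (L : Int) (r : Int) : Int := min (L - 1) (pvBhi L r + r)

-- the a_pts accumulation loop
def pvAptsB (L : Int) : List (Int × Int) :=
  (PySem.List.pyRange (pvAlo L) (pvAhi L + 1) 1).foldl (fun acc i =>
    (PySem.List.pyRange (pvAlo L) (pvAhi L + 1) 1).foldl (fun acc2 j => acc2 ++ [(i, j)]) acc) []

-- the single classifying sweep: (b_pts, c_pts)
def pvSweepB (L : Int) (r : Int) : List (Int × Int) × List (Int × Int) :=
  (PySem.List.pyRange (pvClo L r) (pvChi L r + 1) 1).foldl (fun acc i =>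
    (PySem.List.pyRange (pvClo L r) (pvChi L r + 1) 1).foldl (fun acc2 j =>
      if pvBox (pvAlo L) (pvAhi L) i j then acc2
      else if pvBox (pvBlo L r) (pvBhi L r) i j then (acc2.1 ++ [(i, j)], acc2.2)
      else (acc2.1, acc2.2 ++ [(i, j)])) acc) ([], [])

def define_geometry_geom1_alt (L : Int) (r : Int) :
    (List (Int × Int)) × (List (Int × Int)) × (List (Int × Int)) :=
  (PySem.Set.ofList (pvAptsB L), PySem.Set.ofList (pvSweepB L r).1, PySem.Set.ofList (pvSweepB L r).2)

-- ===== PRECONDITION & SPEC =====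
-- Pre_ excludes L ≤ 0, where A's central region is empty and min() raises ValueError (B returns three empty frozensets there).
def Pre_define_geometry_geom1 (L : Int) (r : Int) : Prop := 1 ≤ L
instance (L : Int) (r : Int) : Decidable (Pre_define_geometry_geom1 L r) := by unfold Pre_define_geometry_geom1; infer_instance
def pvWitness_define_geometry_geom1 : Int × Int := (4, 1)

def Spec_define_geometry_geom1 (L : Int) (r : Int) (out : (List (Int × Int)) × (List (Int × Int)) × (List (Int × Int))) : Prop := out = define_geometry_geom1_alt L r
instance (L : Int) (r : Int) (out : (List (Int × Int)) × (List (Int × Int)) × (List (Int × Int))) : Decidable (Spec_define_geometry_geom1 L r out) := by unfold Spec_define_geometry_geom1; infer_instance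

-- ===== CLAIM (what is proved, stated in full; the proofs are below) =====
def Claim_equal_define_geometry_geom1 : Prop := ∀ (L : Int) (r : Int), Dom_define_geometry_geom1 L r → Pre_define_geometry_geom1 L r → Spec_define_geometry_geom1 L r (define_geometry_geom1 L r)

-- ===== LEMMAS AND PROOFS =====

-- Inner classifying loop = two filters.
theorem pv_cols_classify (cols : List Int) (p q : Int → Bool) (f : Int → Int × Int)
    (b0 c0 : List (Int × Int)) :
    cols.foldl (fun acc j =>
      if p j then acc
      else if q j then (acc.1 ++ [f j], acc.2)
      else (acc.1, acc.2 ++ [f j])) (b0, c0)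
    = (b0 ++ (cols.filter (fun j => !p j && q j)).map f,
       c0 ++ (cols.filter (fun j => !p j && !q j)).map f) := by
  induction cols generalizing b0 c0 with
  | nil => simp
  | cons x xs ih =>
    by_cases hp : p x = true <;> by_cases hq : q x = true <;>
      simp [hp, hq, ih]

-- Whole sweep = two flatMaps of filtered rows.
theorem pv_rows_classify (rows cols : List Int) (p q : Int → Int → Bool)
    (b0 c0 : List (Int × Int)) :
    rows.foldl (fun acc i => cols.foldl (fun acc2 j =>
      if p i j then acc2
      else if q i j then (acc2.1 ++ [(i, j)], acc2.2)
      else (acc2.1, acc2.2 ++ [(i, j)])) acc) (b0, c0)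
    = (b0 ++ rows.flatMap (fun i => (cols.filter (fun j => !p i j && q i j)).map (fun j => (i, j))),
       c0 ++ rows.flatMap (fun i => (cols.filter (fun j => !p i j && !q i j)).map (fun j => (i, j)))) := by
  induction rows generalizing b0 c0 with
  | nil => simp
  | cons x xs ih =>
    rw [List.foldl_cons, pv_cols_classify cols (p x) (q x) (fun j => (x, j)) b0 c0, ih]
    simp

-- The a_pts loop = flatMap of rows.
theorem pv_rows_append (rows cols : List Int) (acc0 : List (Int × Int)) :
    rows.foldl (fun acc i => cols.foldl (fun acc2 j => acc2 ++ [(i, j)]) acc) acc0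
    = acc0 ++ rows.flatMap (fun i => cols.map (fun j => (i, j))) := by
  induction rows generalizing acc0 with
  | nil => simp
  | cons x xs ih =>
    rw [List.foldl_cons, PySem.List.foldl_append_singleton_eq_map, ih]
    simp

-- Filtering an interval condition over a larger range = filtering over the sub-range.
theorem pv_filter_interval (cl ch bl bh : Int) (q : Int → Bool)
    (h1 : cl ≤ bl) (h2 : bh + 1 ≤ ch) (h3 : bl ≤ bh) :
    (PySem.List.pyRange cl ch 1).filter (fun j => q j && (decide (bl ≤ j) && decide (j ≤ bh)))
    = (PySem.List.pyRange bl (bh + 1) 1).filter q := by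
  rw [PySem.List.pyRange_one_append cl bl ch h1 (by omega),
      PySem.List.pyRange_one_append bl (bh + 1) ch (by omega) h2,
      List.filter_append, List.filter_append]
  have e1 : (PySem.List.pyRange cl bl 1).filter (fun j => q j && (decide (bl ≤ j) && decide (j ≤ bh))) = [] := by
    apply List.filter_eq_nil_iff.mpr
    intro a ha
    rw [PySem.List.mem_pyRange_one] at ha
    simp only [Bool.and_eq_true, decide_eq_true_eq, not_and]
    omega
  have e3 : (PySem.List.pyRange (bh + 1) ch 1).filter (fun j => q j && (decide (bl ≤ j) && decide (j ≤ bh))) = [] := by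
    apply List.filter_eq_nil_iff.mpr
    intro a ha
    rw [PySem.List.mem_pyRange_one] at ha
    simp only [Bool.and_eq_true, decide_eq_true_eq, not_and]
    omega
  have e2 : (PySem.List.pyRange bl (bh + 1) 1).filter (fun j => q j && (decide (bl ≤ j) && decide (j ≤ bh)))
      = (PySem.List.pyRange bl (bh + 1) 1).filter q := by
    apply List.filter_congr
    intro a ha
    rw [PySem.List.mem_pyRange_one] at ha
    simp [show bl ≤ a by omega, show a ≤ bh by omega]
  rw [e1, e2, e3, List.nil_append, List.append_nil]

-- The grid of a square box, in row-major order.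
def pvGrid (lo hi : Int) : List (Int × Int) :=
  (PySem.List.pyRange lo (hi + 1) 1).flatMap (fun i =>
    (PySem.List.pyRange lo (hi + 1) 1).map (fun j => (i, j)))

theorem pv_box_iff (lo hi i j : Int) :
    pvBox lo hi i j = true ↔ (lo ≤ i ∧ i ≤ hi ∧ lo ≤ j ∧ j ≤ hi) := by
  simp [pvBox]
  tauto

theorem pv_alo_bounds (L : Int) (hL : 1 ≤ L) :
    0 ≤ pvAlo L ∧ pvAlo L ≤ pvAhi L ∧ pvAhi L ≤ L - 1 ∧ pvAhi L ≤ pvAlo L + 1 := by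
  unfold pvAlo pvAhi
  rw [PySem.Int.floordiv_eq_ediv_of_pos (by norm_num)]
  omega

theorem pv_grid_mem (lo hi i j : Int) :
    (i, j) ∈ pvGrid lo hi ↔ (lo ≤ i ∧ i ≤ hi ∧ lo ≤ j ∧ j ≤ hi) := by
  simp [pvGrid, List.mem_flatMap, List.mem_map, PySem.List.mem_pyRange_one]
  tauto

-- A's central frozenset is exactly the clipped 2x2 grid, in the same generation order.
theorem pv_AsetA_eq (L : Int) (hL : 1 ≤ L) :
    pvAsetA L = PySem.Set.ofList (pvGrid (pvAlo L) (pvAhi L)) := by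
  have h2 : PySem.Int.floordiv L 2 = L / 2 := PySem.Int.floordiv_eq_ediv_of_pos (by norm_num)
  rcases eq_or_lt_of_le hL with h1 | h1
  · rw [← h1]; decide
  · have hal : pvAlo L = L / 2 - 1 := by unfold pvAlo; rw [h2]; omega
    have hah : pvAhi L = L / 2 := by unfold pvAhi; rw [h2]; omega
    simp only [pvAsetA, pvGrid, h2, hal, hah]
    congr 1
    rw [show PySem.List.pyRange 0 2 1 = [0, 1] from by decide,
        PySem.List.pyRange_one_cons (show L / 2 - 1 < L / 2 + 1 by omega),
        PySem.List.pyRange_one_cons (show L / 2 - 1 + 1 < L / 2 + 1 by omega),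
        PySem.List.pyRange_one_eq_nil (show L / 2 + 1 ≤ L / 2 - 1 + 1 + 1 by omega)]
    simp [show (1:Int) ≤ L / 2 by omega, show L / 2 ≤ L by omega,
          show (0:Int) ≤ L / 2 by omega, show L / 2 < L by omega]

theorem pv_AsetA_mem (L : Int) (hL : 1 ≤ L) (i j : Int) :
    (i, j) ∈ pvAsetA L ↔ (pvAlo L ≤ i ∧ i ≤ pvAhi L ∧ pvAlo L ≤ j ∧ j ≤ pvAhi L) := by
  rw [pv_AsetA_eq L hL, PySem.Set.mem_ofList, pv_grid_mem]

theorem pv_containsA (L : Int) (hL : 1 ≤ L) (i j : Int) :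
    PySem.Set.contains (pvAsetA L) (i, j) = pvBox (pvAlo L) (pvAhi L) i j := by
  apply Bool.coe_iff_coe.mp
  rw [PySem.Set.contains_iff, pv_AsetA_mem L hL, pv_box_iff]

-- min()/max() over a list whose images attain a bound.
theorem pv_min_key (S : List (Int × Int)) (f : Int × Int → Int) (lo : Int)
    (hlo : ∀ p ∈ S, lo ≤ f p) (hwit : ∃ p ∈ S, f p = lo) :
    (PySem.List.min? (S.map f) (fun x => x)).getD 0 = lo := by
  obtain ⟨w, hwS, hwf⟩ := hwit
  cases h : PySem.List.min? (S.map f) (fun x => x) with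
  | none =>
    rw [PySem.List.min?_eq_none_iff] at h
    have hw : f w ∈ S.map f := List.mem_map.mpr ⟨w, hwS, rfl⟩
    rw [h] at hw
    simp at hw
  | some m =>
    have hmem := PySem.List.min?_mem h
    have hmin := PySem.List.min?_isMin h
    obtain ⟨p, hpS, hpm⟩ := List.mem_map.mp hmem
    have h1 := hlo p hpS
    have h2 : m ≤ lo := by
      have := hmin (f w) (List.mem_map.mpr ⟨w, hwS, rfl⟩)
      omega
    simp
    omega

theorem pv_max_key (S : List (Int × Int)) (f : Int × Int → Int) (hi : Int)
    (hhi : ∀ p ∈ S, f p ≤ hi) (hwit : ∃ p ∈ S, f p = hi) :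
    (PySem.List.max? (S.map f) (fun x => x)).getD 0 = hi := by
  obtain ⟨w, hwS, hwf⟩ := hwit
  cases h : PySem.List.max? (S.map f) (fun x => x) with
  | none =>
    rw [PySem.List.max?_eq_none_iff] at h
    have hw : f w ∈ S.map f := List.mem_map.mpr ⟨w, hwS, rfl⟩
    rw [h] at hw
    simp at hw
  | some m =>
    have hmem := PySem.List.max?_mem h
    have hmax := PySem.List.max?_isMax h
    obtain ⟨p, hpS, hpm⟩ := List.mem_map.mp hmem
    have h1 := hhi p hpS
    have h2 : hi ≤ m := by
      have := hmax (f w) (List.mem_map.mpr ⟨w, hwS, rfl⟩)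
      omega
    simp
    omega

theorem pv_Abounds (L : Int) (hL : 1 ≤ L) :
    pvAiminA L = pvAlo L ∧ pvAimaxA L = pvAhi L ∧ pvAjminA L = pvAlo L ∧ pvAjmaxA L = pvAhi L := by
  have hb := pv_alo_bounds L hL
  have hmem : ∀ p : Int × Int, p ∈ pvAsetA L ↔
      (pvAlo L ≤ p.1 ∧ p.1 ≤ pvAhi L ∧ pvAlo L ≤ p.2 ∧ p.2 ≤ pvAhi L) := by
    intro ⟨i, j⟩; exact pv_AsetA_mem L hL i j
  have hc : (pvAlo L, pvAlo L) ∈ pvAsetA L := (hmem _).mpr (by simp; omega)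
  have hd : (pvAhi L, pvAhi L) ∈ pvAsetA L := (hmem _).mpr (by simp; omega)
  unfold pvAiminA pvAimaxA pvAjminA pvAjmaxA
  refine ⟨?_, ?_, ?_, ?_⟩
  · exact pv_min_key _ _ _ (fun p hp => ((hmem p).mp hp).1) ⟨_, hc, rfl⟩
  · exact pv_max_key _ _ _ (fun p hp => ((hmem p).mp hp).2.1) ⟨_, hd, rfl⟩
  · exact pv_min_key _ _ _ (fun p hp => ((hmem p).mp hp).2.2.1) ⟨_, hc, rfl⟩
  · exact pv_max_key _ _ _ (fun p hp => ((hmem p).mp hp).2.2.2) ⟨_, hd, rfl⟩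

-- A's B frozenset, with the set-membership test rewritten as the A box test.
theorem pv_BlistA (L r : Int) (hL : 1 ≤ L) :
    pvBsetA L r = PySem.Set.ofList
      ((PySem.List.pyRange (pvBlo L r) (pvBhi L r + 1) 1).flatMap (fun i =>
        ((PySem.List.pyRange (pvBlo L r) (pvBhi L r + 1) 1).filter (fun j =>
          !pvBox (pvAlo L) (pvAhi L) i j)).map (fun j => (i, j)))) := by
  obtain ⟨e1, e2, e3, e4⟩ := pv_Abounds L hL
  simp only [pvBsetA, e1, e2, e3, e4, pv_containsA L hL, pvBlo, pvBhi]

-- A's C frozenset, with the A-membership test rewritten as the A box test.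
theorem pv_ClistA (L r : Int) (hL : 1 ≤ L) :
    pvCsetA L r = PySem.Set.ofList
      ((PySem.List.pyRange (pvClo L r) (pvChi L r + 1) 1).flatMap (fun i =>
        ((PySem.List.pyRange (pvClo L r) (pvChi L r + 1) 1).filter (fun j =>
          !pvBox (pvAlo L) (pvAhi L) i j && !(PySem.Set.contains (pvBsetA L r) (i, j)))).map (fun j => (i, j)))) := by
  obtain ⟨e1, e2, e3, e4⟩ := pv_Abounds L hL
  simp only [pvCsetA, e1, e2, e3, e4, pv_containsA L hL, pvBlo, pvBhi, pvClo, pvChi]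

theorem pv_memB (L r : Int) (hL : 1 ≤ L) (i j : Int) :
    ((i, j) ∈ pvBsetA L r) ↔
      (pvBlo L r ≤ i ∧ i ≤ pvBhi L r ∧ pvBlo L r ≤ j ∧ j ≤ pvBhi L r ∧
        ¬(pvBox (pvAlo L) (pvAhi L) i j = true)) := by
  rw [pv_BlistA L r hL, PySem.Set.mem_ofList]
  simp [List.mem_flatMap, List.mem_filter, List.mem_map, PySem.List.mem_pyRange_one, pvBox]
  omega

-- Restricting a flatMap over a range to a sub-range on which all other rows are empty.
theorem pv_flatMap_sub (lo1 hi1 lo2 hi2 : Int) (f : Int → List (Int × Int))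
    (h1 : lo1 ≤ lo2) (h2 : hi2 ≤ hi1)
    (hnil : ∀ i, i ∈ PySem.List.pyRange lo1 hi1 1 → i ∉ PySem.List.pyRange lo2 hi2 1 → f i = []) :
    (PySem.List.pyRange lo1 hi1 1).flatMap f = (PySem.List.pyRange lo2 hi2 1).flatMap f := by
  by_cases hcase : hi2 ≤ lo2
  · rw [PySem.List.pyRange_one_eq_nil hcase]
    refine List.flatMap_eq_nil_iff.mpr (fun i hi => hnil i hi ?_) |>.trans (by simp)
    rw [PySem.List.pyRange_one_eq_nil hcase]
    simp
  · rw [PySem.List.pyRange_one_append lo1 lo2 hi1 h1 (by omega),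
        PySem.List.pyRange_one_append lo2 hi2 hi1 (by omega) h2,
        List.flatMap_append, List.flatMap_append]
    have hA : (PySem.List.pyRange lo1 lo2 1).flatMap f = [] := by
      refine List.flatMap_eq_nil_iff.mpr (fun i hi => ?_)
      rw [PySem.List.mem_pyRange_one] at hi
      refine hnil i ?_ ?_
      · rw [PySem.List.mem_pyRange_one]; omega
      · rw [PySem.List.mem_pyRange_one]; omega
    have hC : (PySem.List.pyRange hi2 hi1 1).flatMap f = [] := by
      refine List.flatMap_eq_nil_iff.mpr (fun i hi => ?_)
      rw [PySem.List.mem_pyRange_one] at hi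
      refine hnil i ?_ ?_
      · rw [PySem.List.mem_pyRange_one]; omega
      · rw [PySem.List.mem_pyRange_one]; omega
    rw [hA, hC, List.nil_append, List.append_nil]

-- The classified B rows of the sweep equal A's B comprehension.
theorem pv_B_main (L r : Int) (hL : 1 ≤ L) :
    (PySem.List.pyRange (pvClo L r) (pvChi L r + 1) 1).flatMap (fun i =>
      ((PySem.List.pyRange (pvClo L r) (pvChi L r + 1) 1).filter (fun j =>
        !pvBox (pvAlo L) (pvAhi L) i j && pvBox (pvBlo L r) (pvBhi L r) i j)).map (fun j => (i, j)))
    = (PySem.List.pyRange (pvBlo L r) (pvBhi L r + 1) 1).flatMap (fun i =>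
      ((PySem.List.pyRange (pvBlo L r) (pvBhi L r + 1) 1).filter (fun j =>
        !pvBox (pvAlo L) (pvAhi L) i j)).map (fun j => (i, j))) := by
  have hb := pv_alo_bounds L hL
  have h5 : pvBlo L r = max 0 (pvAlo L - r) := rfl
  have h6 : pvBhi L r = min (L - 1) (pvAhi L + r) := rfl
  have h7 : pvClo L r = max 0 (pvBlo L r - r) := rfl
  have h8 : pvChi L r = min (L - 1) (pvBhi L r + r) := rfl
  by_cases hr : 0 ≤ r
  · -- r ≥ 0: the B rectangle sits inside the C rectangle
    have f1 : pvClo L r ≤ pvBlo L r := by omega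
    have f2 : pvBhi L r + 1 ≤ pvChi L r + 1 := by omega
    have f3 : pvBlo L r ≤ pvBhi L r := by omega
    rw [pv_flatMap_sub (pvClo L r) (pvChi L r + 1) (pvBlo L r) (pvBhi L r + 1) _ f1 f2 ?hnil]
    · apply List.flatMap_congr
      intro i hi
      rw [PySem.List.mem_pyRange_one] at hi
      have hfc : (PySem.List.pyRange (pvClo L r) (pvChi L r + 1) 1).filter (fun j =>
          !pvBox (pvAlo L) (pvAhi L) i j && pvBox (pvBlo L r) (pvBhi L r) i j)
          = (PySem.List.pyRange (pvClo L r) (pvChi L r + 1) 1).filter (fun j =>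
          (!pvBox (pvAlo L) (pvAhi L) i j) && (decide (pvBlo L r ≤ j) && decide (j ≤ pvBhi L r))) := by
        apply List.filter_congr
        intro a _
        simp [pvBox, show pvBlo L r ≤ i by omega, show i ≤ pvBhi L r by omega]
      rw [hfc, pv_filter_interval (pvClo L r) (pvChi L r + 1) (pvBlo L r) (pvBhi L r)
            (fun j => !pvBox (pvAlo L) (pvAhi L) i j) f1 f2 f3]
    · intro i _ hni
      rw [PySem.List.mem_pyRange_one] at hni
      have : (PySem.List.pyRange (pvClo L r) (pvChi L r + 1) 1).filter (fun j =>
          !pvBox (pvAlo L) (pvAhi L) i j && pvBox (pvBlo L r) (pvBhi L r) i j) = [] := by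
        apply List.filter_eq_nil_iff.mpr
        intro a _
        simp only [Bool.and_eq_true, not_and]
        intro _
        simp [pvBox]
        omega
      rw [this]
      simp
  · -- r < 0: both rectangles are empty
    have hnb : pvBhi L r + 1 ≤ pvBlo L r := by omega
    have hnc : pvChi L r + 1 ≤ pvClo L r := by omega
    rw [PySem.List.pyRange_one_eq_nil hnb, PySem.List.pyRange_one_eq_nil hnc]
    simp

-- The classified C rows of the sweep equal A's C comprehension.
theorem pv_C_main (L r : Int) (hL : 1 ≤ L) :
    (PySem.List.pyRange (pvClo L r) (pvChi L r + 1) 1).flatMap (fun i =>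
      ((PySem.List.pyRange (pvClo L r) (pvChi L r + 1) 1).filter (fun j =>
        !pvBox (pvAlo L) (pvAhi L) i j && !(PySem.Set.contains (pvBsetA L r) (i, j)))).map (fun j => (i, j)))
    = (PySem.List.pyRange (pvClo L r) (pvChi L r + 1) 1).flatMap (fun i =>
      ((PySem.List.pyRange (pvClo L r) (pvChi L r + 1) 1).filter (fun j =>
        !pvBox (pvAlo L) (pvAhi L) i j && !pvBox (pvBlo L r) (pvBhi L r) i j)).map (fun j => (i, j))) := by
  apply List.flatMap_congr
  intro i _
  congr 1
  apply List.filter_congr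
  intro a _
  by_cases hA : pvBox (pvAlo L) (pvAhi L) i a = true
  · simp [hA]
  · have hA' : pvBox (pvAlo L) (pvAhi L) i a = false := by
      simp [Bool.not_eq_true] at hA; exact hA
    simp only [hA', Bool.not_false, Bool.true_and]
    congr 1
    apply Bool.coe_iff_coe.mp
    rw [PySem.Set.contains_iff, pv_memB L r hL]
    simp only [pvBox, Bool.and_eq_true, decide_eq_true_eq] at hA ⊢
    omega

theorem pv_A_eq (L : Int) (hL : 1 ≤ L) :
    pvAsetA L = PySem.Set.ofList (pvAptsB L) := by
  rw [pv_AsetA_eq L hL]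
  congr 1
  unfold pvAptsB
  rw [pv_rows_append]
  simp [pvGrid]

theorem pv_main (L r : Int) (hL : 1 ≤ L) :
    define_geometry_geom1 L r = define_geometry_geom1_alt L r := by
  have hsw : pvSweepB L r =
      ((PySem.List.pyRange (pvClo L r) (pvChi L r + 1) 1).flatMap (fun i =>
        ((PySem.List.pyRange (pvClo L r) (pvChi L r + 1) 1).filter (fun j =>
          !pvBox (pvAlo L) (pvAhi L) i j && pvBox (pvBlo L r) (pvBhi L r) i j)).map (fun j => (i, j))),
       (PySem.List.pyRange (pvClo L r) (pvChi L r + 1) 1).flatMap (fun i =>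
        ((PySem.List.pyRange (pvClo L r) (pvChi L r + 1) 1).filter (fun j =>
          !pvBox (pvAlo L) (pvAhi L) i j && !pvBox (pvBlo L r) (pvBhi L r) i j)).map (fun j => (i, j)))) := by
    unfold pvSweepB
    rw [pv_rows_classify]
    simp
  have hB : pvBsetA L r = PySem.Set.ofList (pvSweepB L r).1 := by
    rw [hsw, pv_BlistA L r hL]
    exact congrArg _ (pv_B_main L r hL).symm
  have hC : pvCsetA L r = PySem.Set.ofList (pvSweepB L r).2 := by
    rw [hsw, pv_ClistA L r hL]
    exact congrArg _ (pv_C_main L r hL)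
  unfold define_geometry_geom1 define_geometry_geom1_alt
  rw [pv_A_eq L hL, hB, hC]

-- ===== VERDICT (by name: the statement is the Claim_ definition above) =====
theorem define_geometry_geom1_spec : Claim_equal_define_geometry_geom1 := by
  intro L r _ hPre
  exact pv_main L r hPre
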